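-- pv_equiv track=rewrite | github.com/Hongyil1/COMP90024_Assignment | processing/tweet_processer.py | get_tweet_lifestyle
-- ===== SOURCE A (Python) =====
-- def get_tweet_lifestyle(tweet_word_set):
--     dic = {
--         "Education": ["High school", "University", "Primary school", "Kindergarten",
--                       "Class", "College", "Teacher", "Student", "Professor", "report",
--                       "Learn", "School", "Train", "Degree", "Library", "Museum",
--                       "Education", "Exam", "Examination", "Scholarship", "Homework",
--                       "Curriculum", "Course", "Seminar", "Lecture", "Workshop", "Reflection", "Tutor",
--                       "Due", "Deadline", "Assignment", "Subject", "Presentation", "Recording", "Record",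
--                       "LMS", "Discussion", "Board", "Study", "Lesson", "Experiment", "Enrol", "Timetable",
--                       "Enrollment", "Hard", "Training", "PHD", "Essay"],
--         "Shopping": ["Mall", "Myer", "David Jones", "Luxury goods", "Cloth", "Bag",
--                      "Shop", "Beauty", "Shoe", "Coles", "Woolworth", "Market", "Grocery",
--                      "Supermarket", "Purchase", "Coupon", "Discount", "Sale", "Promotion", "Shoes", "Mac",
--                      "Makeup", "Price", "Online", "Cart", "Order", "Payment", "Pay",
--                      "Chadstone", "DFO", "Apple", "Electronic", "Laptop", "Phone", "TV", "Appliance",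
--                      "Pet", "Gift", "Cash", "Gift card", "Refund", "Return", "Customer", "Membership",
--                      "Store", "Book", "Music", "CD", "Instrument", "Buy", "Sell", "Receipt", "Shopping"],
--         "Food": ["Delivery", "Take away", "Restaurant", "Delicious", "Yummy", "Brunch", "Breakfast",
--                  "Dinner", "Lunch", "Recipe", "Food", "Cook", "Sushi", "Coffee", "Dessert", "Rice",
--                  "Restaurant", "Eat", "Drink", "Wine", "Chinese", "Japanese", "Pizza", "Pasta", "Bread",
--                  "Milk", "Fruit", "Banana", "Pancake", "Source", "Eat", "Heat", "Meat", "Frozen", "Fresh",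
--                  "Fish", "Beef", "Chicken", "Soup", "BQQ", "Vegetable", "Vegetarian", "Gluten",
--                  "Latte", "Sugar", "Flat White", "Reservation", "Book", "Allergic", "Buffet", "Seafood",
--                  "Bun", "Butter", "Cheese", "Apple", "Orange", "Mandarin", "Broccoli",
--                  "Chilly", "Salt", "Vinegar", "Forks", "Fried", "Foodie", "Kitchen"],
--         "Entertainment": ["Movie", "KTV", "Pub", "Performance", "Show", "Concert",
--                           "Club", "Hang out", "Karaoke", "Restaurant", "Play", "Song", "Cinema", "Film",
--                           "Trailer", "Youtube", "Instagram", "Twitter", "Tweet", "Facebook", "Media",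
--                           "Social", "Playground", "Aquarium", "Acrobatics", "Band", "Casino", "Circus",
--                           "Fashion show", "Show", "Fair", "Theater", "Vacation", "Zoo", "Garden", "Parade",
--                           "Box", "Ticket", "Entertainment"],
--         "Living": ["Property", "Green land", "Apartment", "House", "Decoration", "Furniture", "Realestate",
--                    "Utility", "Bill", "Rent", "Property", "Townhouse", "Agency", "Sell", "Sold", "Contract",
--                    "Agreement", "Lease", "Rent", "Invoice", "Open", "Metre", "Meter", "Square", "Room",
--                    "Balcony", "Floor", "Elevator", "Lift", "Sofa", "Move", "Loan", "Bank", "Living"],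
--         "Travel": ["Holiday", "Vocation", "Visit", "Vacation", "Trip", "Hotel", "Gold Coast", "Great Ocean Road",
--                    "Tour", "Great", "View", "Self-drive", "Rent", "Road", "Music", "Motel", "Hotel",
--                    "Sightseeing", "Scenery", "Baggage", "Accommodation", "Flight",
--                    "Cruise", "Destination", "Backpack", "Ticket", "Beach", "Parking",
--                    "Airbnb", "Type", "Book", "Animal", "Charge", "Insurance", "Atlas", "Travel",
--                    "Tourist", "Tourism", "Melbourne", "Sydney", "Opera"],
--         "Medical": ["Hospital", "Sick", "Fever", "Nurse", "Doctor", "Medicine", "Health",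
--                     "Disease", "A first", "Obesity", "Overweight", "Suicide", "Diet", "Band Aid", "Infection",
--                     "Virus", "Dentist", "Dental", "Surgery", "Cancer", "Examine", "Insurance", "Medicare", "Check",
--                     "Vaccine", "Patient", "Pharmacy", "Pharmacist", "GP", "Physician", "Hurt",
--                     "Radio", "Medical"],
--         "Sports": ["Sport", "Cricket", "Football", "Soccer", "Tennis", "Rugby league", "Olympics", "Swim", "Diving",
--                    "Skydiving", "Ski", "Surf", "Snorkeling", "Scuba diving", "Running", "Gym", "Work out",
--                    "Exercise", "Melbourne Cup", "Baseball", "Basketball", "Bowling", "Sports",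
--                    "Ticket", "Skating", "F1", "Footy", "AFL", "Brisbane Lions", "Greater Western Sydney Giants",
--                    "Sydney Swans", "West Coast Eagles", "Western Bulldogs"],
--         "Traffic": ["Tram", "Metro", "Car", "Bike", "Bicycle", "Train", "Boat", "Speedboat",
--                     "Plane", "Aviation", "Fleet", "Airline", "Flight", "Ship", "Traffic jam", "Traffic", "Bus",
--                     "Starbus", "Traffic", "Transport", "Skybus", "Jet", "Star", "Ticket",
--                     "Dock", "Airbag", "Auto", "Avenue", "Road", "brakes", "bike", "carpool", "crash", "detour",
--                     "drive", "driver", "driver's license", "driveway", "expressway", "emission", "fast", "slow",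
--                     "fuel", "tire", "gasoline", "GPS", "gutter", "highway", "kilometer", "motor", "parking",
--                     "pedestrian", "pedal", "pass", "park", "speed", "stop", "vehicle", "underpass",
--                     "zebra crossing", "signal", "light"],
--     }
--
--     lifestyle = []
--     for key, value in dic.items():
--         # Normalizing Case
--         value = map(lambda word: word.lower(), value)
--         if len(set(value) & tweet_word_set) > 0:
--             lifestyle.append(key.lower())
--
--     return lifestyle
-- ===== SOURCE B (Python) =====
-- # Precomputed inverted index: lowered keyword -> lowercase categories containing it,
-- # in dic-insertion order; output filters the fixed category list by the matched set.
-- _CATEGORIES = ['education', 'shopping', 'food', 'entertainment', 'living', 'travel', 'medical', 'sports', 'traffic']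
--
-- _INDEX = {
--     'high school': ['education'],
--     'university': ['education'],
--     'primary school': ['education'],
--     'kindergarten': ['education'],
--     'class': ['education'],
--     'college': ['education'],
--     'teacher': ['education'],
--     'student': ['education'],
--     'professor': ['education'],
--     'report': ['education'],
--     'learn': ['education'],
--     'school': ['education'],
--     'train': ['education', 'traffic'],
--     'degree': ['education'],
--     'library': ['education'],
--     'museum': ['education'],
--     'education': ['education'],
--     'exam': ['education'],
--     'examination': ['education'],
--     'scholarship': ['education'],
--     'homework': ['education'],
--     'curriculum': ['education'],
--     'course': ['education'],
--     'seminar': ['education'],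
--     'lecture': ['education'],
--     'workshop': ['education'],
--     'reflection': ['education'],
--     'tutor': ['education'],
--     'due': ['education'],
--     'deadline': ['education'],
--     'assignment': ['education'],
--     'subject': ['education'],
--     'presentation': ['education'],
--     'recording': ['education'],
--     'record': ['education'],
--     'lms': ['education'],
--     'discussion': ['education'],
--     'board': ['education'],
--     'study': ['education'],
--     'lesson': ['education'],
--     'experiment': ['education'],
--     'enrol': ['education'],
--     'timetable': ['education'],
--     'enrollment': ['education'],
--     'hard': ['education'],
--     'training': ['education'],
--     'phd': ['education'],
--     'essay': ['education'],
--     'mall': ['shopping'],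
--     'myer': ['shopping'],
--     'david jones': ['shopping'],
--     'luxury goods': ['shopping'],
--     'cloth': ['shopping'],
--     'bag': ['shopping'],
--     'shop': ['shopping'],
--     'beauty': ['shopping'],
--     'shoe': ['shopping'],
--     'coles': ['shopping'],
--     'woolworth': ['shopping'],
--     'market': ['shopping'],
--     'grocery': ['shopping'],
--     'supermarket': ['shopping'],
--     'purchase': ['shopping'],
--     'coupon': ['shopping'],
--     'discount': ['shopping'],
--     'sale': ['shopping'],
--     'promotion': ['shopping'],
--     'shoes': ['shopping'],
--     'mac': ['shopping'],
--     'makeup': ['shopping'],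
--     'price': ['shopping'],
--     'online': ['shopping'],
--     'cart': ['shopping'],
--     'order': ['shopping'],
--     'payment': ['shopping'],
--     'pay': ['shopping'],
--     'chadstone': ['shopping'],
--     'dfo': ['shopping'],
--     'apple': ['shopping', 'food'],
--     'electronic': ['shopping'],
--     'laptop': ['shopping'],
--     'phone': ['shopping'],
--     'tv': ['shopping'],
--     'appliance': ['shopping'],
--     'pet': ['shopping'],
--     'gift': ['shopping'],
--     'cash': ['shopping'],
--     'gift card': ['shopping'],
--     'refund': ['shopping'],
--     'return': ['shopping'],
--     'customer': ['shopping'],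
--     'membership': ['shopping'],
--     'store': ['shopping'],
--     'book': ['shopping', 'food', 'travel'],
--     'music': ['shopping', 'travel'],
--     'cd': ['shopping'],
--     'instrument': ['shopping'],
--     'buy': ['shopping'],
--     'sell': ['shopping', 'living'],
--     'receipt': ['shopping'],
--     'shopping': ['shopping'],
--     'delivery': ['food'],
--     'take away': ['food'],
--     'restaurant': ['food', 'entertainment'],
--     'delicious': ['food'],
--     'yummy': ['food'],
--     'brunch': ['food'],
--     'breakfast': ['food'],
--     'dinner': ['food'],
--     'lunch': ['food'],
--     'recipe': ['food'],
--     'food': ['food'],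
--     'cook': ['food'],
--     'sushi': ['food'],
--     'coffee': ['food'],
--     'dessert': ['food'],
--     'rice': ['food'],
--     'eat': ['food'],
--     'drink': ['food'],
--     'wine': ['food'],
--     'chinese': ['food'],
--     'japanese': ['food'],
--     'pizza': ['food'],
--     'pasta': ['food'],
--     'bread': ['food'],
--     'milk': ['food'],
--     'fruit': ['food'],
--     'banana': ['food'],
--     'pancake': ['food'],
--     'source': ['food'],
--     'heat': ['food'],
--     'meat': ['food'],
--     'frozen': ['food'],
--     'fresh': ['food'],
--     'fish': ['food'],
--     'beef': ['food'],
--     'chicken': ['food'],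
--     'soup': ['food'],
--     'bqq': ['food'],
--     'vegetable': ['food'],
--     'vegetarian': ['food'],
--     'gluten': ['food'],
--     'latte': ['food'],
--     'sugar': ['food'],
--     'flat white': ['food'],
--     'reservation': ['food'],
--     'allergic': ['food'],
--     'buffet': ['food'],
--     'seafood': ['food'],
--     'bun': ['food'],
--     'butter': ['food'],
--     'cheese': ['food'],
--     'orange': ['food'],
--     'mandarin': ['food'],
--     'broccoli': ['food'],
--     'chilly': ['food'],
--     'salt': ['food'],
--     'vinegar': ['food'],
--     'forks': ['food'],
--     'fried': ['food'],
--     'foodie': ['food'],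
--     'kitchen': ['food'],
--     'movie': ['entertainment'],
--     'ktv': ['entertainment'],
--     'pub': ['entertainment'],
--     'performance': ['entertainment'],
--     'show': ['entertainment'],
--     'concert': ['entertainment'],
--     'club': ['entertainment'],
--     'hang out': ['entertainment'],
--     'karaoke': ['entertainment'],
--     'play': ['entertainment'],
--     'song': ['entertainment'],
--     'cinema': ['entertainment'],
--     'film': ['entertainment'],
--     'trailer': ['entertainment'],
--     'youtube': ['entertainment'],
--     'instagram': ['entertainment'],
--     'twitter': ['entertainment'],
--     'tweet': ['entertainment'],
--     'facebook': ['entertainment'],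
--     'media': ['entertainment'],
--     'social': ['entertainment'],
--     'playground': ['entertainment'],
--     'aquarium': ['entertainment'],
--     'acrobatics': ['entertainment'],
--     'band': ['entertainment'],
--     'casino': ['entertainment'],
--     'circus': ['entertainment'],
--     'fashion show': ['entertainment'],
--     'fair': ['entertainment'],
--     'theater': ['entertainment'],
--     'vacation': ['entertainment', 'travel'],
--     'zoo': ['entertainment'],
--     'garden': ['entertainment'],
--     'parade': ['entertainment'],
--     'box': ['entertainment'],
--     'ticket': ['entertainment', 'travel', 'sports', 'traffic'],
--     'entertainment': ['entertainment'],
--     'property': ['living'],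
--     'green land': ['living'],
--     'apartment': ['living'],
--     'house': ['living'],
--     'decoration': ['living'],
--     'furniture': ['living'],
--     'realestate': ['living'],
--     'utility': ['living'],
--     'bill': ['living'],
--     'rent': ['living', 'travel'],
--     'townhouse': ['living'],
--     'agency': ['living'],
--     'sold': ['living'],
--     'contract': ['living'],
--     'agreement': ['living'],
--     'lease': ['living'],
--     'invoice': ['living'],
--     'open': ['living'],
--     'metre': ['living'],
--     'meter': ['living'],
--     'square': ['living'],
--     'room': ['living'],
--     'balcony': ['living'],
--     'floor': ['living'],
--     'elevator': ['living'],
--     'lift': ['living'],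
--     'sofa': ['living'],
--     'move': ['living'],
--     'loan': ['living'],
--     'bank': ['living'],
--     'living': ['living'],
--     'holiday': ['travel'],
--     'vocation': ['travel'],
--     'visit': ['travel'],
--     'trip': ['travel'],
--     'hotel': ['travel'],
--     'gold coast': ['travel'],
--     'great ocean road': ['travel'],
--     'tour': ['travel'],
--     'great': ['travel'],
--     'view': ['travel'],
--     'self-drive': ['travel'],
--     'road': ['travel', 'traffic'],
--     'motel': ['travel'],
--     'sightseeing': ['travel'],
--     'scenery': ['travel'],
--     'baggage': ['travel'],
--     'accommodation': ['travel'],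
--     'flight': ['travel', 'traffic'],
--     'cruise': ['travel'],
--     'destination': ['travel'],
--     'backpack': ['travel'],
--     'beach': ['travel'],
--     'parking': ['travel', 'traffic'],
--     'airbnb': ['travel'],
--     'type': ['travel'],
--     'animal': ['travel'],
--     'charge': ['travel'],
--     'insurance': ['travel', 'medical'],
--     'atlas': ['travel'],
--     'travel': ['travel'],
--     'tourist': ['travel'],
--     'tourism': ['travel'],
--     'melbourne': ['travel'],
--     'sydney': ['travel'],
--     'opera': ['travel'],
--     'hospital': ['medical'],
--     'sick': ['medical'],
--     'fever': ['medical'],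
--     'nurse': ['medical'],
--     'doctor': ['medical'],
--     'medicine': ['medical'],
--     'health': ['medical'],
--     'disease': ['medical'],
--     'a first': ['medical'],
--     'obesity': ['medical'],
--     'overweight': ['medical'],
--     'suicide': ['medical'],
--     'diet': ['medical'],
--     'band aid': ['medical'],
--     'infection': ['medical'],
--     'virus': ['medical'],
--     'dentist': ['medical'],
--     'dental': ['medical'],
--     'surgery': ['medical'],
--     'cancer': ['medical'],
--     'examine': ['medical'],
--     'medicare': ['medical'],
--     'check': ['medical'],
--     'vaccine': ['medical'],
--     'patient': ['medical'],
--     'pharmacy': ['medical'],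
--     'pharmacist': ['medical'],
--     'gp': ['medical'],
--     'physician': ['medical'],
--     'hurt': ['medical'],
--     'radio': ['medical'],
--     'medical': ['medical'],
--     'sport': ['sports'],
--     'cricket': ['sports'],
--     'football': ['sports'],
--     'soccer': ['sports'],
--     'tennis': ['sports'],
--     'rugby league': ['sports'],
--     'olympics': ['sports'],
--     'swim': ['sports'],
--     'diving': ['sports'],
--     'skydiving': ['sports'],
--     'ski': ['sports'],
--     'surf': ['sports'],
--     'snorkeling': ['sports'],
--     'scuba diving': ['sports'],
--     'running': ['sports'],
--     'gym': ['sports'],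
--     'work out': ['sports'],
--     'exercise': ['sports'],
--     'melbourne cup': ['sports'],
--     'baseball': ['sports'],
--     'basketball': ['sports'],
--     'bowling': ['sports'],
--     'sports': ['sports'],
--     'skating': ['sports'],
--     'f1': ['sports'],
--     'footy': ['sports'],
--     'afl': ['sports'],
--     'brisbane lions': ['sports'],
--     'greater western sydney giants': ['sports'],
--     'sydney swans': ['sports'],
--     'west coast eagles': ['sports'],
--     'western bulldogs': ['sports'],
--     'tram': ['traffic'],
--     'metro': ['traffic'],
--     'car': ['traffic'],
--     'bike': ['traffic'],
--     'bicycle': ['traffic'],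
--     'boat': ['traffic'],
--     'speedboat': ['traffic'],
--     'plane': ['traffic'],
--     'aviation': ['traffic'],
--     'fleet': ['traffic'],
--     'airline': ['traffic'],
--     'ship': ['traffic'],
--     'traffic jam': ['traffic'],
--     'traffic': ['traffic'],
--     'bus': ['traffic'],
--     'starbus': ['traffic'],
--     'transport': ['traffic'],
--     'skybus': ['traffic'],
--     'jet': ['traffic'],
--     'star': ['traffic'],
--     'dock': ['traffic'],
--     'airbag': ['traffic'],
--     'auto': ['traffic'],
--     'avenue': ['traffic'],
--     'brakes': ['traffic'],
--     'carpool': ['traffic'],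
--     'crash': ['traffic'],
--     'detour': ['traffic'],
--     'drive': ['traffic'],
--     'driver': ['traffic'],
--     "driver's license": ['traffic'],
--     'driveway': ['traffic'],
--     'expressway': ['traffic'],
--     'emission': ['traffic'],
--     'fast': ['traffic'],
--     'slow': ['traffic'],
--     'fuel': ['traffic'],
--     'tire': ['traffic'],
--     'gasoline': ['traffic'],
--     'gps': ['traffic'],
--     'gutter': ['traffic'],
--     'highway': ['traffic'],
--     'kilometer': ['traffic'],
--     'motor': ['traffic'],
--     'pedestrian': ['traffic'],
--     'pedal': ['traffic'],
--     'pass': ['traffic'],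
--     'park': ['traffic'],
--     'speed': ['traffic'],
--     'stop': ['traffic'],
--     'vehicle': ['traffic'],
--     'underpass': ['traffic'],
--     'zebra crossing': ['traffic'],
--     'signal': ['traffic'],
--     'light': ['traffic'],
-- }
--
--
-- def get_tweet_lifestyle(tweet_word_set):
--     matched = set()
--     for word in tweet_word_set:
--         matched.update(_INDEX.get(word, ()))
--     return [c for c in _CATEGORIES if c in matched]
-- ===== Notes on version B (the rewrite author's own statement) =====
-- stated objective: alternative
-- what changed: Replaces the per-category lowered-keyword-set intersections with a precomputed constant inverted index (lowered keyword -> lowercase category names) scanned once by the tweet words into a matched set, then filters the fixed category list in dict-insertion order.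
import Mathlib
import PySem

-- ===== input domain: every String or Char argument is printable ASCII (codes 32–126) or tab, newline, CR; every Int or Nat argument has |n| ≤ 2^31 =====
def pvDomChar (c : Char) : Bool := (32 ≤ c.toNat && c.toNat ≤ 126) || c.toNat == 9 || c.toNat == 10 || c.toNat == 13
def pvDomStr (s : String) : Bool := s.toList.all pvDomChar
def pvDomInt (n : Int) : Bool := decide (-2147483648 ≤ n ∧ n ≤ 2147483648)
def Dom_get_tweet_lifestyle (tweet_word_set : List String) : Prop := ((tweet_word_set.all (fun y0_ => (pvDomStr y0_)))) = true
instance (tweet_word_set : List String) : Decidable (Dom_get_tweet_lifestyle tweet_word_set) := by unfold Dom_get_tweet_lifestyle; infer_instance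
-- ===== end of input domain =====

-- ===== PORT A =====
-- B replaces the per-category set intersections with a precomputed inverted index (lowered keyword -> lowercase categories) scanned by the tweet words (objective: alternative).
def pvDic : List (String × List String) := [
  ("Education", ["High school", "University", "Primary school", "Kindergarten", "Class", "College", "Teacher", "Student", "Professor", "report", "Learn", "School", "Train", "Degree", "Library", "Museum", "Education", "Exam", "Examination", "Scholarship", "Homework", "Curriculum", "Course", "Seminar", "Lecture", "Workshop", "Reflection", "Tutor", "Due", "Deadline", "Assignment", "Subject", "Presentation", "Recording", "Record", "LMS", "Discussion", "Board", "Study", "Lesson", "Experiment", "Enrol", "Timetable", "Enrollment", "Hard", "Training", "PHD", "Essay"]),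
  ("Shopping", ["Mall", "Myer", "David Jones", "Luxury goods", "Cloth", "Bag", "Shop", "Beauty", "Shoe", "Coles", "Woolworth", "Market", "Grocery", "Supermarket", "Purchase", "Coupon", "Discount", "Sale", "Promotion", "Shoes", "Mac", "Makeup", "Price", "Online", "Cart", "Order", "Payment", "Pay", "Chadstone", "DFO", "Apple", "Electronic", "Laptop", "Phone", "TV", "Appliance", "Pet", "Gift", "Cash", "Gift card", "Refund", "Return", "Customer", "Membership", "Store", "Book", "Music", "CD", "Instrument", "Buy", "Sell", "Receipt", "Shopping"]),
  ("Food", ["Delivery", "Take away", "Restaurant", "Delicious", "Yummy", "Brunch", "Breakfast", "Dinner", "Lunch", "Recipe", "Food", "Cook", "Sushi", "Coffee", "Dessert", "Rice", "Restaurant", "Eat", "Drink", "Wine", "Chinese", "Japanese", "Pizza", "Pasta", "Bread", "Milk", "Fruit", "Banana", "Pancake", "Source", "Eat", "Heat", "Meat", "Frozen", "Fresh", "Fish", "Beef", "Chicken", "Soup", "BQQ", "Vegetable", "Vegetarian", "Gluten", "Latte", "Sugar", "Flat White", "Reservation", "Book", "Allergic", "Buffet", "Seafood", "Bun", "Butter",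 "Cheese", "Apple", "Orange", "Mandarin", "Broccoli", "Chilly", "Salt", "Vinegar", "Forks", "Fried", "Foodie", "Kitchen"]),
  ("Entertainment", ["Movie", "KTV", "Pub", "Performance", "Show", "Concert", "Club", "Hang out", "Karaoke", "Restaurant", "Play", "Song", "Cinema", "Film", "Trailer", "Youtube", "Instagram", "Twitter", "Tweet", "Facebook", "Media", "Social", "Playground", "Aquarium", "Acrobatics", "Band", "Casino", "Circus", "Fashion show", "Show", "Fair", "Theater", "Vacation", "Zoo", "Garden", "Parade", "Box", "Ticket", "Entertainment"]),
  ("Living", ["Property", "Green land", "Apartment", "House", "Decoration", "Furniture", "Realestate", "Utility", "Bill", "Rent", "Property", "Townhouse", "Agency", "Sell", "Sold", "Contract", "Agreement", "Lease", "Rent", "Invoice", "Open", "Metre", "Meter", "Square", "Room", "Balcony", "Floor", "Elevator", "Lift", "Sofa", "Move", "Loan", "Bank", "Living"]),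
  ("Travel", ["Holiday", "Vocation", "Visit", "Vacation", "Trip", "Hotel", "Gold Coast", "Great Ocean Road", "Tour", "Great", "View", "Self-drive", "Rent", "Road", "Music", "Motel", "Hotel", "Sightseeing", "Scenery", "Baggage", "Accommodation", "Flight", "Cruise", "Destination", "Backpack", "Ticket", "Beach", "Parking", "Airbnb", "Type", "Book", "Animal", "Charge", "Insurance", "Atlas", "Travel", "Tourist", "Tourism", "Melbourne", "Sydney", "Opera"]),
  ("Medical", ["Hospital", "Sick", "Fever", "Nurse", "Doctor", "Medicine", "Health", "Disease", "A first", "Obesity", "Overweight", "Suicide", "Diet", "Band Aid", "Infection", "Virus", "Dentist", "Dental", "Surgery", "Cancer", "Examine", "Insurance", "Medicare", "Check", "Vaccine", "Patient", "Pharmacy", "Pharmacist", "GP", "Physician", "Hurt", "Radio", "Medical"]),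
  ("Sports", ["Sport", "Cricket", "Football", "Soccer", "Tennis", "Rugby league", "Olympics", "Swim", "Diving", "Skydiving", "Ski", "Surf", "Snorkeling", "Scuba diving", "Running", "Gym", "Work out", "Exercise", "Melbourne Cup", "Baseball", "Basketball", "Bowling", "Sports", "Ticket", "Skating", "F1", "Footy", "AFL", "Brisbane Lions", "Greater Western Sydney Giants", "Sydney Swans", "West Coast Eagles", "Western Bulldogs"]),
  ("Traffic", ["Tram", "Metro", "Car", "Bike", "Bicycle", "Train", "Boat", "Speedboat", "Plane", "Aviation", "Fleet", "Airline", "Flight", "Ship", "Traffic jam", "Traffic", "Bus", "Starbus", "Traffic", "Transport", "Skybus", "Jet", "Star", "Ticket", "Dock", "Airbag", "Auto", "Avenue", "Road", "brakes", "bike", "carpool", "crash", "detour", "drive", "driver", "driver's license", "driveway", "expressway", "emission", "fast", "slow", "fuel", "tire", "gasoline", "GPS", "gutter", "highway", "kilometer", "motor", "parking", "pedestrian", "pedal", "pass", "park", "speed", "stop", "vehicle", "underpass", "zebra crossing", "signal", "light"])]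

def get_tweet_lifestyle (tweet_word_set : List String) : List String :=
  pvDic.foldl (fun lifestyle kv =>
    let value := kv.2.map PySem.Str.lower
    if 0 < PySem.Set.len (PySem.Set.inter (PySem.Set.ofList value) tweet_word_set) then
      lifestyle ++ [PySem.Str.lower kv.1]
    else lifestyle) []

-- ===== PORT B =====
-- Source B's module-level constants: the category list and the inverted index, as literals
def pvCats : List String := ["education", "shopping", "food", "entertainment", "living", "travel", "medical", "sports", "traffic"]

def pvIndexLit : PySem.Dict String (List String) := PySem.Dict.mk [
  ("high school", ["education"]),
  ("university", ["education"]),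
  ("primary school", ["education"]),
  ("kindergarten", ["education"]),
  ("class", ["education"]),
  ("college", ["education"]),
  ("teacher", ["education"]),
  ("student", ["education"]),
  ("professor", ["education"]),
  ("report", ["education"]),
  ("learn", ["education"]),
  ("school", ["education"]),
  ("train", ["education", "traffic"]),
  ("degree", ["education"]),
  ("library", ["education"]),
  ("museum", ["education"]),
  ("education", ["education"]),
  ("exam", ["education"]),
  ("examination", ["education"]),
  ("scholarship", ["education"]),
  ("homework", ["education"]),
  ("curriculum", ["education"]),
  ("course", ["education"]),
  ("seminar", ["education"]),
  ("lecture", ["education"]),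
  ("workshop", ["education"]),
  ("reflection", ["education"]),
  ("tutor", ["education"]),
  ("due", ["education"]),
  ("deadline", ["education"]),
  ("assignment", ["education"]),
  ("subject", ["education"]),
  ("presentation", ["education"]),
  ("recording", ["education"]),
  ("record", ["education"]),
  ("lms", ["education"]),
  ("discussion", ["education"]),
  ("board", ["education"]),
  ("study", ["education"]),
  ("lesson", ["education"]),
  ("experiment", ["education"]),
  ("enrol", ["education"]),
  ("timetable", ["education"]),
  ("enrollment", ["education"]),
  ("hard", ["education"]),
  ("training", ["education"]),
  ("phd", ["education"]),
  ("essay", ["education"]),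
  ("mall", ["shopping"]),
  ("myer", ["shopping"]),
  ("david jones", ["shopping"]),
  ("luxury goods", ["shopping"]),
  ("cloth", ["shopping"]),
  ("bag", ["shopping"]),
  ("shop", ["shopping"]),
  ("beauty", ["shopping"]),
  ("shoe", ["shopping"]),
  ("coles", ["shopping"]),
  ("woolworth", ["shopping"]),
  ("market", ["shopping"]),
  ("grocery", ["shopping"]),
  ("supermarket", ["shopping"]),
  ("purchase", ["shopping"]),
  ("coupon", ["shopping"]),
  ("discount", ["shopping"]),
  ("sale", ["shopping"]),
  ("promotion", ["shopping"]),
  ("shoes", ["shopping"]),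
  ("mac", ["shopping"]),
  ("makeup", ["shopping"]),
  ("price", ["shopping"]),
  ("online", ["shopping"]),
  ("cart", ["shopping"]),
  ("order", ["shopping"]),
  ("payment", ["shopping"]),
  ("pay", ["shopping"]),
  ("chadstone", ["shopping"]),
  ("dfo", ["shopping"]),
  ("apple", ["shopping", "food"]),
  ("electronic", ["shopping"]),
  ("laptop", ["shopping"]),
  ("phone", ["shopping"]),
  ("tv", ["shopping"]),
  ("appliance", ["shopping"]),
  ("pet", ["shopping"]),
  ("gift", ["shopping"]),
  ("cash", ["shopping"]),
  ("gift card", ["shopping"]),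
  ("refund", ["shopping"]),
  ("return", ["shopping"]),
  ("customer", ["shopping"]),
  ("membership", ["shopping"]),
  ("store", ["shopping"]),
  ("book", ["shopping", "food", "travel"]),
  ("music", ["shopping", "travel"]),
  ("cd", ["shopping"]),
  ("instrument", ["shopping"]),
  ("buy", ["shopping"]),
  ("sell", ["shopping", "living"]),
  ("receipt", ["shopping"]),
  ("shopping", ["shopping"]),
  ("delivery", ["food"]),
  ("take away", ["food"]),
  ("restaurant", ["food", "entertainment"]),
  ("delicious", ["food"]),
  ("yummy", ["food"]),
  ("brunch", ["food"]),
  ("breakfast", ["food"]),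
  ("dinner", ["food"]),
  ("lunch", ["food"]),
  ("recipe", ["food"]),
  ("food", ["food"]),
  ("cook", ["food"]),
  ("sushi", ["food"]),
  ("coffee", ["food"]),
  ("dessert", ["food"]),
  ("rice", ["food"]),
  ("eat", ["food"]),
  ("drink", ["food"]),
  ("wine", ["food"]),
  ("chinese", ["food"]),
  ("japanese", ["food"]),
  ("pizza", ["food"]),
  ("pasta", ["food"]),
  ("bread", ["food"]),
  ("milk", ["food"]),
  ("fruit", ["food"]),
  ("banana", ["food"]),
  ("pancake", ["food"]),
  ("source", ["food"]),
  ("heat", ["food"]),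
  ("meat", ["food"]),
  ("frozen", ["food"]),
  ("fresh", ["food"]),
  ("fish", ["food"]),
  ("beef", ["food"]),
  ("chicken", ["food"]),
  ("soup", ["food"]),
  ("bqq", ["food"]),
  ("vegetable", ["food"]),
  ("vegetarian", ["food"]),
  ("gluten", ["food"]),
  ("latte", ["food"]),
  ("sugar", ["food"]),
  ("flat white", ["food"]),
  ("reservation", ["food"]),
  ("allergic", ["food"]),
  ("buffet", ["food"]),
  ("seafood", ["food"]),
  ("bun", ["food"]),
  ("butter", ["food"]),
  ("cheese", ["food"]),
  ("orange", ["food"]),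
  ("mandarin", ["food"]),
  ("broccoli", ["food"]),
  ("chilly", ["food"]),
  ("salt", ["food"]),
  ("vinegar", ["food"]),
  ("forks", ["food"]),
  ("fried", ["food"]),
  ("foodie", ["food"]),
  ("kitchen", ["food"]),
  ("movie", ["entertainment"]),
  ("ktv", ["entertainment"]),
  ("pub", ["entertainment"]),
  ("performance", ["entertainment"]),
  ("show", ["entertainment"]),
  ("concert", ["entertainment"]),
  ("club", ["entertainment"]),
  ("hang out", ["entertainment"]),
  ("karaoke", ["entertainment"]),
  ("play", ["entertainment"]),
  ("song", ["entertainment"]),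
  ("cinema", ["entertainment"]),
  ("film", ["entertainment"]),
  ("trailer", ["entertainment"]),
  ("youtube", ["entertainment"]),
  ("instagram", ["entertainment"]),
  ("twitter", ["entertainment"]),
  ("tweet", ["entertainment"]),
  ("facebook", ["entertainment"]),
  ("media", ["entertainment"]),
  ("social", ["entertainment"]),
  ("playground", ["entertainment"]),
  ("aquarium", ["entertainment"]),
  ("acrobatics", ["entertainment"]),
  ("band", ["entertainment"]),
  ("casino", ["entertainment"]),
  ("circus", ["entertainment"]),
  ("fashion show", ["entertainment"]),
  ("fair", ["entertainment"]),
  ("theater", ["entertainment"]),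
  ("vacation", ["entertainment", "travel"]),
  ("zoo", ["entertainment"]),
  ("garden", ["entertainment"]),
  ("parade", ["entertainment"]),
  ("box", ["entertainment"]),
  ("ticket", ["entertainment", "travel", "sports", "traffic"]),
  ("entertainment", ["entertainment"]),
  ("property", ["living"]),
  ("green land", ["living"]),
  ("apartment", ["living"]),
  ("house", ["living"]),
  ("decoration", ["living"]),
  ("furniture", ["living"]),
  ("realestate", ["living"]),
  ("utility", ["living"]),
  ("bill", ["living"]),
  ("rent", ["living", "travel"]),
  ("townhouse", ["living"]),
  ("agency", ["living"]),
  ("sold", ["living"]),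
  ("contract", ["living"]),
  ("agreement", ["living"]),
  ("lease", ["living"]),
  ("invoice", ["living"]),
  ("open", ["living"]),
  ("metre", ["living"]),
  ("meter", ["living"]),
  ("square", ["living"]),
  ("room", ["living"]),
  ("balcony", ["living"]),
  ("floor", ["living"]),
  ("elevator", ["living"]),
  ("lift", ["living"]),
  ("sofa", ["living"]),
  ("move", ["living"]),
  ("loan", ["living"]),
  ("bank", ["living"]),
  ("living", ["living"]),
  ("holiday", ["travel"]),
  ("vocation", ["travel"]),
  ("visit", ["travel"]),
  ("trip", ["travel"]),
  ("hotel", ["travel"]),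
  ("gold coast", ["travel"]),
  ("great ocean road", ["travel"]),
  ("tour", ["travel"]),
  ("great", ["travel"]),
  ("view", ["travel"]),
  ("self-drive", ["travel"]),
  ("road", ["travel", "traffic"]),
  ("motel", ["travel"]),
  ("sightseeing", ["travel"]),
  ("scenery", ["travel"]),
  ("baggage", ["travel"]),
  ("accommodation", ["travel"]),
  ("flight", ["travel", "traffic"]),
  ("cruise", ["travel"]),
  ("destination", ["travel"]),
  ("backpack", ["travel"]),
  ("beach", ["travel"]),
  ("parking", ["travel", "traffic"]),
  ("airbnb", ["travel"]),
  ("type", ["travel"]),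
  ("animal", ["travel"]),
  ("charge", ["travel"]),
  ("insurance", ["travel", "medical"]),
  ("atlas", ["travel"]),
  ("travel", ["travel"]),
  ("tourist", ["travel"]),
  ("tourism", ["travel"]),
  ("melbourne", ["travel"]),
  ("sydney", ["travel"]),
  ("opera", ["travel"]),
  ("hospital", ["medical"]),
  ("sick", ["medical"]),
  ("fever", ["medical"]),
  ("nurse", ["medical"]),
  ("doctor", ["medical"]),
  ("medicine", ["medical"]),
  ("health", ["medical"]),
  ("disease", ["medical"]),
  ("a first", ["medical"]),
  ("obesity", ["medical"]),
  ("overweight", ["medical"]),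
  ("suicide", ["medical"]),
  ("diet", ["medical"]),
  ("band aid", ["medical"]),
  ("infection", ["medical"]),
  ("virus", ["medical"]),
  ("dentist", ["medical"]),
  ("dental", ["medical"]),
  ("surgery", ["medical"]),
  ("cancer", ["medical"]),
  ("examine", ["medical"]),
  ("medicare", ["medical"]),
  ("check", ["medical"]),
  ("vaccine", ["medical"]),
  ("patient", ["medical"]),
  ("pharmacy", ["medical"]),
  ("pharmacist", ["medical"]),
  ("gp", ["medical"]),
  ("physician", ["medical"]),
  ("hurt", ["medical"]),
  ("radio", ["medical"]),
  ("medical", ["medical"]),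
  ("sport", ["sports"]),
  ("cricket", ["sports"]),
  ("football", ["sports"]),
  ("soccer", ["sports"]),
  ("tennis", ["sports"]),
  ("rugby league", ["sports"]),
  ("olympics", ["sports"]),
  ("swim", ["sports"]),
  ("diving", ["sports"]),
  ("skydiving", ["sports"]),
  ("ski", ["sports"]),
  ("surf", ["sports"]),
  ("snorkeling", ["sports"]),
  ("scuba diving", ["sports"]),
  ("running", ["sports"]),
  ("gym", ["sports"]),
  ("work out", ["sports"]),
  ("exercise", ["sports"]),
  ("melbourne cup", ["sports"]),
  ("baseball", ["sports"]),
  ("basketball", ["sports"]),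
  ("bowling", ["sports"]),
  ("sports", ["sports"]),
  ("skating", ["sports"]),
  ("f1", ["sports"]),
  ("footy", ["sports"]),
  ("afl", ["sports"]),
  ("brisbane lions", ["sports"]),
  ("greater western sydney giants", ["sports"]),
  ("sydney swans", ["sports"]),
  ("west coast eagles", ["sports"]),
  ("western bulldogs", ["sports"]),
  ("tram", ["traffic"]),
  ("metro", ["traffic"]),
  ("car", ["traffic"]),
  ("bike", ["traffic"]),
  ("bicycle", ["traffic"]),
  ("boat", ["traffic"]),
  ("speedboat", ["traffic"]),
  ("plane", ["traffic"]),
  ("aviation", ["traffic"]),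
  ("fleet", ["traffic"]),
  ("airline", ["traffic"]),
  ("ship", ["traffic"]),
  ("traffic jam", ["traffic"]),
  ("traffic", ["traffic"]),
  ("bus", ["traffic"]),
  ("starbus", ["traffic"]),
  ("transport", ["traffic"]),
  ("skybus", ["traffic"]),
  ("jet", ["traffic"]),
  ("star", ["traffic"]),
  ("dock", ["traffic"]),
  ("airbag", ["traffic"]),
  ("auto", ["traffic"]),
  ("avenue", ["traffic"]),
  ("brakes", ["traffic"]),
  ("carpool", ["traffic"]),
  ("crash", ["traffic"]),
  ("detour", ["traffic"]),
  ("drive", ["traffic"]),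
  ("driver", ["traffic"]),
  ("driver's license", ["traffic"]),
  ("driveway", ["traffic"]),
  ("expressway", ["traffic"]),
  ("emission", ["traffic"]),
  ("fast", ["traffic"]),
  ("slow", ["traffic"]),
  ("fuel", ["traffic"]),
  ("tire", ["traffic"]),
  ("gasoline", ["traffic"]),
  ("gps", ["traffic"]),
  ("gutter", ["traffic"]),
  ("highway", ["traffic"]),
  ("kilometer", ["traffic"]),
  ("motor", ["traffic"]),
  ("pedestrian", ["traffic"]),
  ("pedal", ["traffic"]),
  ("pass", ["traffic"]),
  ("park", ["traffic"]),
  ("speed", ["traffic"]),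
  ("stop", ["traffic"]),
  ("vehicle", ["traffic"]),
  ("underpass", ["traffic"]),
  ("zebra crossing", ["traffic"]),
  ("signal", ["traffic"]),
  ("light", ["traffic"])]

def get_tweet_lifestyle_alt (tweet_word_set : List String) : List String :=
  let matched := tweet_word_set.foldl (fun m w => PySem.Set.update m (pvIndexLit.getD w [])) PySem.Set.empty
  pvCats.filter (fun c => PySem.Set.contains matched c)

-- ===== PRECONDITION & SPEC =====
def Spec_get_tweet_lifestyle (tweet_word_set : List String) (out : List String) : Prop := out = get_tweet_lifestyle_alt tweet_word_set
instance (tweet_word_set : List String) (out : List String) : Decidable (Spec_get_tweet_lifestyle tweet_word_set out) := by unfold Spec_get_tweet_lifestyle; infer_instance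

-- ===== CLAIM =====
def Claim_equal_get_tweet_lifestyle : Prop := ∀ (tweet_word_set : List String), Dom_get_tweet_lifestyle tweet_word_set → Spec_get_tweet_lifestyle tweet_word_set (get_tweet_lifestyle tweet_word_set)

-- ===== LEMMAS AND PROOFS =====

-- proof-side constant: pvDic with every string lowered (checked against pvDic by `decide` in low_eq)
def pvDicLow : List (String × List String) := [
  ("education", ["high school", "university", "primary school", "kindergarten", "class", "college", "teacher", "student", "professor", "report", "learn", "school", "train", "degree", "library", "museum", "education", "exam", "examination", "scholarship", "homework", "curriculum", "course", "seminar", "lecture", "workshop", "reflection", "tutor", "due", "deadline", "assignment", "subject", "presentation", "recording", "record", "lms", "discussion", "board", "study", "lesson", "experiment", "enrol", "timetable", "enrollment", "hard", "training", "phd", "essay"]),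
  ("shopping", ["mall", "myer", "david jones", "luxury goods", "cloth", "bag", "shop", "beauty", "shoe", "coles", "woolworth", "market", "grocery", "supermarket", "purchase", "coupon", "discount", "sale", "promotion", "shoes", "mac", "makeup", "price", "online", "cart", "order", "payment", "pay", "chadstone", "dfo", "apple", "electronic", "laptop", "phone", "tv", "appliance", "pet", "gift", "cash", "gift card", "refund", "return", "customer", "membership", "store", "book", "music", "cd", "instrument", "buy", "sell", "receipt", "shopping"]),
  ("food", ["delivery", "take away", "restaurant", "delicious", "yummy", "brunch", "breakfast", "dinner", "lunch", "recipe", "food", "cook", "sushi", "coffee", "dessert", "rice", "restaurant", "eat", "drink", "wine", "chinese", "japanese", "pizza", "pasta", "bread", "milk", "fruit", "banana", "pancake", "source", "eat", "heat", "meat", "frozen", "fresh", "fish", "beef", "chicken", "soup", "bqq", "vegetable", "vegetarian", "gluten", "latte", "sugar", "flat white", "reservation", "book", "allergic", "buffet", "seafood", "bun", "butter", "cheese", "apple", "orange", "mandarin", "broccoli", "chilly", "salt", "vinegar", "forks", "fried", "foodie", "kitchen"]),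
  ("entertainment", ["movie", "ktv", "pub", "performance", "show", "concert", "club", "hang out", "karaoke", "restaurant", "play", "song", "cinema", "film", "trailer", "youtube", "instagram", "twitter", "tweet", "facebook", "media", "social", "playground", "aquarium", "acrobatics", "band", "casino", "circus", "fashion show", "show", "fair", "theater", "vacation", "zoo", "garden", "parade", "box", "ticket", "entertainment"]),
  ("living", ["property", "green land", "apartment", "house", "decoration", "furniture", "realestate", "utility", "bill", "rent", "property", "townhouse", "agency", "sell", "sold", "contract", "agreement", "lease", "rent", "invoice", "open", "metre", "meter", "square", "room", "balcony", "floor", "elevator", "lift", "sofa", "move", "loan", "bank", "living"]),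
  ("travel", ["holiday", "vocation", "visit", "vacation", "trip", "hotel", "gold coast", "great ocean road", "tour", "great", "view", "self-drive", "rent", "road", "music", "motel", "hotel", "sightseeing", "scenery", "baggage", "accommodation", "flight", "cruise", "destination", "backpack", "ticket", "beach", "parking", "airbnb", "type", "book", "animal", "charge", "insurance", "atlas", "travel", "tourist", "tourism", "melbourne", "sydney", "opera"]),
  ("medical", ["hospital", "sick", "fever", "nurse", "doctor", "medicine", "health", "disease", "a first", "obesity", "overweight", "suicide", "diet", "band aid", "infection", "virus", "dentist", "dental", "surgery", "cancer", "examine", "insurance", "medicare", "check", "vaccine", "patient", "pharmacy", "pharmacist", "gp", "physician", "hurt", "radio", "medical"]),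
  ("sports", ["sport", "cricket", "football", "soccer", "tennis", "rugby league", "olympics", "swim", "diving", "skydiving", "ski", "surf", "snorkeling", "scuba diving", "running", "gym", "work out", "exercise", "melbourne cup", "baseball", "basketball", "bowling", "sports", "ticket", "skating", "f1", "footy", "afl", "brisbane lions", "greater western sydney giants", "sydney swans", "west coast eagles", "western bulldogs"]),
  ("traffic", ["tram", "metro", "car", "bike", "bicycle", "train", "boat", "speedboat", "plane", "aviation", "fleet", "airline", "flight", "ship", "traffic jam", "traffic", "bus", "starbus", "traffic", "transport", "skybus", "jet", "star", "ticket", "dock", "airbag", "auto", "avenue", "road", "brakes", "bike", "carpool", "crash", "detour", "drive", "driver", "driver's license", "driveway", "expressway", "emission", "fast", "slow", "fuel", "tire", "gasoline", "gps", "gutter", "highway", "kilometer", "motor", "parking", "pedestrian", "pedal", "pass", "park", "speed", "stop", "vehicle", "underpass", "zebra crossing", "signal", "light"])]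

-- prop-condition form of PySem.List.foldl_append_if (the port's if has a Prop condition)
lemma foldl_append_if_prop {α β : Type} (P : α → Prop) [DecidablePred P] (f : α → β) (l : List α) :
    l.foldl (fun acc x => if P x then acc ++ [f x] else acc) [] =
      (l.filter (fun x => decide (P x))).map f := by
  have h : (fun (acc : List β) (x : α) => if P x then acc ++ [f x] else acc) =
      (fun acc x => if decide (P x) = true then acc ++ [f x] else acc) := by
    funext acc x; by_cases hx : P x <;> simp [hx]
  rw [h, PySem.List.foldl_append_if, List.nil_append]

-- membership after the matched-accumulating fold over the tweet words
lemma mem_matchedFold (g : String → List String) (tws : List String) (m : PySem.Set String) (k : String) :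
    k ∈ tws.foldl (fun m w => PySem.Set.update m (g w)) m ↔
      (k ∈ m ∨ ∃ w ∈ tws, k ∈ g w) := by
  induction tws generalizing m with
  | nil => simp
  | cons w t ih =>
    rw [List.foldl_cons, ih]
    simp [PySem.Set.mem_update]
    tauto

-- a value found in d.getD w [] pins the association (w, d.getD w []) inside d.items
lemma mem_of_mem_getD {κ ν : Type} [BEq κ] [LawfulBEq κ] (d : PySem.Dict κ (List ν)) (w : κ) (c : ν)
    (h : c ∈ d.getD w []) : (w, d.getD w []) ∈ d.items := by
  unfold PySem.Dict.getD PySem.Dict.get? at *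
  cases hf : List.find? (fun p => p.1 == w) d.items with
  | none => rw [hf] at h; simp at h
  | some p =>
    have hp : (p.1 == w) = true := by
      have := List.find?_some hf
      simpa using this
    have hmem : p ∈ d.items := List.mem_of_find?_eq_some hf
    have hw : p.1 = w := by simpa using hp
    rw [← hw]
    simpa using hmem

set_option maxRecDepth 100000 in
lemma low_eq : pvDic.map (fun kv => (PySem.Str.lower kv.1, kv.2.map PySem.Str.lower)) = pvDicLow := by decide

set_option maxRecDepth 100000 in
lemma lowKeys_nodup : (pvDicLow.map Prod.fst).Nodup := by decide

-- every category listed in an index entry really owns that keyword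
set_option maxRecDepth 100000 in
lemma fact1 : (pvIndexLit.items.all (fun p => p.2.all (fun c =>
    pvDicLow.any (fun kv => kv.1 == c && kv.2.contains p.1)))) = true := by decide

-- every (lowered) keyword of a category is indexed under that category
set_option maxRecDepth 100000 in
set_option maxHeartbeats 4000000 in
lemma fact2 : (pvDicLow.all (fun kv => kv.2.all (fun w =>
    (pvIndexLit.getD w []).contains kv.1))) = true := by decide

set_option maxRecDepth 100000 in
lemma cats_eq : pvCats = pvDicLow.map Prod.fst := by decide

-- the bridge: for a category kv of pvDicLow, its name sits in the index row of w iff w is one of its keywords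
lemma bridge (kv : String × List String) (hkv : kv ∈ pvDicLow) (w : String) :
    kv.1 ∈ pvIndexLit.getD w [] ↔ w ∈ kv.2 := by
  constructor
  · intro h
    have hmem := mem_of_mem_getD pvIndexLit w kv.1 h
    have h1 := fact1
    rw [List.all_eq_true] at h1
    have h1' := h1 _ hmem
    rw [List.all_eq_true] at h1'
    have h1'' := h1' _ h
    rw [List.any_eq_true] at h1''
    obtain ⟨kv', hkv', hb⟩ := h1''
    rw [Bool.and_eq_true, beq_iff_eq, List.contains_iff_mem] at hb
    have : kv' = kv := List.inj_on_of_nodup_map lowKeys_nodup hkv' hkv hb.1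
    subst this
    exact hb.2
  · intro h
    have h2 := fact2
    rw [List.all_eq_true] at h2
    have h2' := h2 _ hkv
    rw [List.all_eq_true] at h2'
    have := h2' _ h
    rwa [List.contains_iff_mem] at this

-- ===== VERDICT =====
set_option maxRecDepth 100000 in
theorem get_tweet_lifestyle_spec : Claim_equal_get_tweet_lifestyle := by
  intro tws _
  unfold Spec_get_tweet_lifestyle get_tweet_lifestyle get_tweet_lifestyle_alt
  rw [foldl_append_if_prop, cats_eq, ← low_eq, List.filter_map, List.filter_map, List.map_map]
  simp only [Function.comp_def]
  congr 1
  apply List.filter_congr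
  intro kv hkv
  have hkvlow : (PySem.Str.lower kv.1, kv.2.map PySem.Str.lower) ∈ pvDicLow := by
    rw [← low_eq]; exact List.mem_map_of_mem hkv
  rw [Bool.eq_iff_iff, decide_eq_true_eq]
  have hmem : ∀ x : String, (PySem.Set.contains
      (tws.foldl (fun m w => PySem.Set.update m (pvIndexLit.getD w [])) PySem.Set.empty) x) = true ↔
      ∃ w ∈ tws, x ∈ pvIndexLit.getD w [] := by
    intro x
    rw [PySem.Set.contains]
    simp only [List.contains_iff_mem]
    rw [mem_matchedFold]
    simp [PySem.Set.empty]
  rw [hmem]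
  constructor
  · intro h
    rw [PySem.Set.len, PySem.Set.inter] at h
    have h' : 0 < (List.filter (fun x => tws.contains x) (PySem.Set.ofList (kv.2.map PySem.Str.lower))).length := by
      exact_mod_cast h
    obtain ⟨x, hx⟩ := List.length_pos_iff_exists_mem.mp h'
    obtain ⟨hx1, hx2⟩ := List.mem_filter.mp hx
    refine ⟨x, by simpa using hx2, ?_⟩
    exact (bridge _ hkvlow x).mpr ((PySem.Set.mem_ofList _ _).mp hx1)
  · rintro ⟨w, hw, hwi⟩
    have hwkv : w ∈ kv.2.map PySem.Str.lower := (bridge _ hkvlow w).mp hwi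
    rw [PySem.Set.len, PySem.Set.inter]
    have hf : w ∈ List.filter (fun x => tws.contains x) (PySem.Set.ofList (kv.2.map PySem.Str.lower)) := by
      rw [List.mem_filter]
      exact ⟨(PySem.Set.mem_ofList _ _).mpr hwkv, by simpa using hw⟩
    have := List.length_pos_iff_exists_mem.mpr ⟨w, hf⟩
    exact_mod_cast this
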